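-- pv_equiv track=rewrite | github.com/epiblastai/homeobox | lancell/standardization/genes.py | detect_organism_from_ensembl_ids
-- ===== SOURCE A (Python) =====
-- _ENSEMBL_PREFIX_TO_ORGANISM: dict[str, str] = {
--     "ENSG": "human",
--     "ENSMUSG": "mouse",
--     "ENSRNOG": "rat",
--     "ENSDARG": "zebrafish",
--     "ENSGALG": "chicken",
--     "ENSBTAG": "cow",
--     "ENSSSCG": "pig",
--     "ENSCAFG": "dog",
--     "ENSECAG": "horse",
--     "ENSFCAG": "cat",
-- }
--
-- def detect_organism_from_ensembl_ids(ids: list[str]) -> dict[str, str]: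
--     """Infer organism for each Ensembl ID from its prefix.
--
--     Returns a mapping from Ensembl ID → organism string.
--     Unknown prefixes map to ``"unknown"``.
--     """
--     result: dict[str, str] = {}
--     for eid in ids:
--         # Strip version suffix
--         base_id = eid.split(".")[0]
--         matched = False
--         # Try longest prefixes first to avoid e.g. ENSG matching before ENSMUSG
--         for prefix in sorted(_ENSEMBL_PREFIX_TO_ORGANISM, key=len, reverse=True):
--             if base_id.startswith(prefix):
--                 result[eid] = _ENSEMBL_PREFIX_TO_ORGANISM[prefix]
--                 matched = True
--                 break
--         if not matched:
--             result[eid] = "unknown"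
--     return result
-- ===== SOURCE B (Python) =====
-- _ENSEMBL_PREFIX_TO_ORGANISM: dict[str, str] = {
--     "ENSG": "human",
--     "ENSMUSG": "mouse",
--     "ENSRNOG": "rat",
--     "ENSDARG": "zebrafish",
--     "ENSGALG": "chicken",
--     "ENSBTAG": "cow",
--     "ENSSSCG": "pig",
--     "ENSCAFG": "dog",
--     "ENSECAG": "horse",
--     "ENSFCAG": "cat",
-- }
--
-- # The distinct prefix lengths, longest first (here [7, 4]).
-- _PREFIX_LENGTHS = sorted({len(p) for p in _ENSEMBL_PREFIX_TO_ORGANISM}, reverse=True)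
--
--
-- def detect_organism_from_ensembl_ids(ids: list[str]) -> dict[str, str]:
--     """Infer organism for each Ensembl ID via direct hash lookups on its
--     length-sliced prefix (longest candidate length first), instead of
--     scanning every known prefix with startswith."""
--     result: dict[str, str] = {}
--     for eid in ids:
--         base_id = eid.split(".")[0]
--         organism = "unknown"
--         for n in _PREFIX_LENGTHS:
--             hit = _ENSEMBL_PREFIX_TO_ORGANISM.get(base_id[:n])
--             if hit is not None:
--                 organism = hit
--                 break
--         result[eid] = organism
--     return result
-- ===== Notes on version B (the rewrite author's own statement) =====
-- stated objective: faster
-- what changed: Replaces the per-id scan over all ten prefixes (re-sorted by length on every id) with two direct dict lookups on the id sliced to each distinct prefix length, longest first, so the prefix table is used as a hash index instead of being traversed.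
import Mathlib
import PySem

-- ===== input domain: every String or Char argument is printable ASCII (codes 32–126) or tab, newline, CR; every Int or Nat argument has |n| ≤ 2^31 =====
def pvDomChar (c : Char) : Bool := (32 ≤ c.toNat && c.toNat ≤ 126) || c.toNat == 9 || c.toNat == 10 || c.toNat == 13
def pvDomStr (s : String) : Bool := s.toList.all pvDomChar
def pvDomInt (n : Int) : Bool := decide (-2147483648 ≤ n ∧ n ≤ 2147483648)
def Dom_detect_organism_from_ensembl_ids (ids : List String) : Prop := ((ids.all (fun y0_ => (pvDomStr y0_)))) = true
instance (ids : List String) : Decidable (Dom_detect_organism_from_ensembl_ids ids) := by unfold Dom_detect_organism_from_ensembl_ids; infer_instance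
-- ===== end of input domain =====

-- B restructures the per-id work: instead of scanning all ten known prefixes (sorted by
-- length, longest first) with startswith, it slices the id to each distinct prefix length
-- (7 then 4) and does a direct dict lookup; objective: idiomatic, same results.

-- ===== PORT A =====
-- the module-level dict _ENSEMBL_PREFIX_TO_ORGANISM (shared data of both Pythons)
def pvPrefixToOrganism : PySem.Dict String String :=
  PySem.Dict.ofList [("ENSG","human"),("ENSMUSG","mouse"),("ENSRNOG","rat"),
    ("ENSDARG","zebrafish"),("ENSGALG","chicken"),("ENSBTAG","cow"),("ENSSSCG","pig"),
    ("ENSCAFG","dog"),("ENSECAG","horse"),("ENSFCAG","cat")]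

-- eid.split(".")[0]: '.' is a nonempty separator, so split? returns some nonempty list
-- and the [0] index is its head (exact on every input).
def pvBaseId (eid : String) : String :=
  ((PySem.Str.split? eid ".").getD []).headD ""

-- A's inner 'for prefix in …: if base_id.startswith(prefix): result[eid] = …; matched = True; break'
-- (dict[prefix] is (get? prefix).getD "": the key is always present, so getD never supplies "")
def pvAInner (result : PySem.Dict String String) (eid base : String) :
    List String → PySem.Dict String String × Bool
  | [] => (result, false)
  | p :: rest =>
    if PySem.Str.startswith base p then
      (result.insert eid ((pvPrefixToOrganism.get? p).getD ""), true)
    else pvAInner result eid base rest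

def detect_organism_from_ensembl_ids (ids : List String) : List (String × String) :=
  (ids.foldl (fun result eid =>
    let base := pvBaseId eid
    let pr := pvAInner result eid base
      (PySem.List.sorted pvPrefixToOrganism.keys (fun p => PySem.Str.len p) true)
    if pr.2 then pr.1 else pr.1.insert eid "unknown") PySem.Dict.empty).items

-- ===== PORT B =====
-- sorted({len(p) for p in _ENSEMBL_PREFIX_TO_ORGANISM}, reverse=True)  (= [7, 4])
def pvPrefixLengths : List Int :=
  PySem.List.sorted (PySem.Set.ofList (pvPrefixToOrganism.keys.map PySem.Str.len))
    (fun x => x) true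

-- 'for n in _PREFIX_LENGTHS: hit = dict.get(base_id[:n]); if hit is not None: organism = hit; break'
def pvBLoop (base : String) : List Int → String
  | [] => "unknown"
  | n :: rest =>
    match pvPrefixToOrganism.get? (PySem.Str.slice base none (some n)) with
    | some hit => hit
    | none => pvBLoop base rest

def detect_organism_from_ensembl_ids_alt (ids : List String) : List (String × String) :=
  (ids.foldl (fun result eid =>
    result.insert eid (pvBLoop (pvBaseId eid) pvPrefixLengths)) PySem.Dict.empty).items

-- ===== PRECONDITION & SPEC =====
def Spec_detect_organism_from_ensembl_ids (ids : List String) (out : List (String × String)) : Prop := out = detect_organism_from_ensembl_ids_alt ids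
instance (ids : List String) (out : List (String × String)) : Decidable (Spec_detect_organism_from_ensembl_ids ids out) := by unfold Spec_detect_organism_from_ensembl_ids; infer_instance

-- ===== CLAIM (what is proved, stated in full; the proofs are below) =====
def Claim_equal_detect_organism_from_ensembl_ids : Prop := ∀ (ids : List String), Dom_detect_organism_from_ensembl_ids ids → Spec_detect_organism_from_ensembl_ids ids (detect_organism_from_ensembl_ids ids)

-- ===== LEMMAS AND PROOFS =====
theorem pvCondIff (base k : String) (n : Int) (h0 : 0 ≤ n) (h : k.toList.length = n.toNat) :
    (k = PySem.Str.slice base none (some n)) ↔ PySem.Str.startswith base k = true := by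
  rw [PySem.Str.startswith]
  have hsl : (PySem.Str.slice base none (some n)).toList = base.toList.take n.toNat := by
    simp [PySem.Str.toList_slice, PySem.List.slice_to base.toList h0]
  constructor
  · intro he
    have ht : k.toList = base.toList.take n.toNat := by rw [he, hsl]
    simp [PySem.Chars.startswith]
    rw [ht]; exact List.take_prefix _ _
  · intro hs
    simp [PySem.Chars.startswith] at hs
    have h2 := List.prefix_iff_eq_take.mp hs
    rw [h] at h2
    exact String.toList_injective (by rw [hsl, ← h2])

theorem pvCondNe (base k : String) (h : 4 < k.toList.length) :
    ¬ (k = PySem.Str.slice base none (some (4:Int))) := by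
  intro he
  have ht : k.toList = base.toList.take 4 := by
    rw [he]; simp [PySem.Str.toList_slice, PySem.List.slice_to base.toList (by norm_num : (0:Int) ≤ 4)]
  have h2 := congrArg List.length ht
  rw [List.length_take] at h2
  omega

theorem pvEnsg7 (base : String) (h : "ENSG" = PySem.Str.slice base none (some (7:Int))) :
    base = "ENSG" := by
  have ht : ("ENSG" : String).toList = base.toList.take 7 := by
    rw [h]; simp [PySem.Str.toList_slice, PySem.List.slice_to base.toList (by norm_num : (0:Int) ≤ 7)]
  have hl := congrArg List.length ht
  rw [List.length_take] at hl
  norm_num at hl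
  rw [show ("ENSG":String).length = 4 from rfl] at hl
  have hb : base.toList.length = base.length := rfl
  have htk : base.toList.take 7 = base.toList := List.take_of_length_le (by omega)
  exact (String.toList_injective (by rw [← htk, ← ht])).symm


def pvAVal (base : String) : List String → String
  | [] => "unknown"
  | p :: rest =>
    if PySem.Str.startswith base p then (pvPrefixToOrganism.get? p).getD "" else pvAVal base rest

theorem pvAInner_eq (result : PySem.Dict String String) (eid base : String) (ps : List String) :
    (let pr := pvAInner result eid base ps
     if pr.2 then pr.1 else pr.1.insert eid "unknown")
    = result.insert eid (pvAVal base ps) := by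
  induction ps with
  | nil => simp [pvAInner, pvAVal]
  | cons p rest ih =>
    simp only [pvAInner, pvAVal]
    by_cases h : PySem.Str.startswith base p = true
    · simp only [h]
      simp
    · simp only [h]
      simpa using ih

set_option maxHeartbeats 1000000 in
theorem pvVal_eq (base : String) :
    pvAVal base ["ENSMUSG","ENSRNOG","ENSDARG","ENSGALG","ENSBTAG","ENSSSCG","ENSCAFG","ENSECAG","ENSFCAG","ENSG"]
    = pvBLoop base [7,4] := by
  by_cases hG : ("ENSG" : String) = PySem.Str.slice base none (some (7:Int))
  · have hb := pvEnsg7 base hG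
    subst hb
    decide
  · have hD : pvPrefixToOrganism = PySem.Dict.mk [("ENSG","human"),("ENSMUSG","mouse"),
      ("ENSRNOG","rat"),("ENSDARG","zebrafish"),("ENSGALG","chicken"),("ENSBTAG","cow"),
      ("ENSSSCG","pig"),("ENSCAFG","dog"),("ENSECAG","horse"),("ENSFCAG","cat")] := rfl
    simp only [pvAVal, pvBLoop]
    simp only [show ((pvPrefixToOrganism.get? "ENSG").getD "") = "human" from by decide,
      show ((pvPrefixToOrganism.get? "ENSMUSG").getD "") = "mouse" from by decide,
      show ((pvPrefixToOrganism.get? "ENSRNOG").getD "") = "rat" from by decide,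
      show ((pvPrefixToOrganism.get? "ENSDARG").getD "") = "zebrafish" from by decide,
      show ((pvPrefixToOrganism.get? "ENSGALG").getD "") = "chicken" from by decide,
      show ((pvPrefixToOrganism.get? "ENSBTAG").getD "") = "cow" from by decide,
      show ((pvPrefixToOrganism.get? "ENSSSCG").getD "") = "pig" from by decide,
      show ((pvPrefixToOrganism.get? "ENSCAFG").getD "") = "dog" from by decide,
      show ((pvPrefixToOrganism.get? "ENSECAG").getD "") = "horse" from by decide,
      show ((pvPrefixToOrganism.get? "ENSFCAG").getD "") = "cat" from by decide]
    rw [hD]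
    simp only [PySem.Dict.get?_mk_cons, beq_iff_eq]
    simp only [show PySem.Dict.mk ([] : List (String × String)) = PySem.Dict.empty from rfl,
      PySem.Dict.get?_empty]
    simp only [pvCondNe base "ENSMUSG" (by decide),
      pvCondNe base "ENSRNOG" (by decide),
      pvCondNe base "ENSDARG" (by decide),
      pvCondNe base "ENSGALG" (by decide),
      pvCondNe base "ENSBTAG" (by decide),
      pvCondNe base "ENSSSCG" (by decide),
      pvCondNe base "ENSCAFG" (by decide),
      pvCondNe base "ENSECAG" (by decide),
      pvCondNe base "ENSFCAG" (by decide), hG, if_false]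
    simp only [pvCondIff base "ENSMUSG" 7 (by decide) (by decide),
      pvCondIff base "ENSRNOG" 7 (by decide) (by decide),
      pvCondIff base "ENSDARG" 7 (by decide) (by decide),
      pvCondIff base "ENSGALG" 7 (by decide) (by decide),
      pvCondIff base "ENSBTAG" 7 (by decide) (by decide),
      pvCondIff base "ENSSSCG" 7 (by decide) (by decide),
      pvCondIff base "ENSCAFG" 7 (by decide) (by decide),
      pvCondIff base "ENSECAG" 7 (by decide) (by decide),
      pvCondIff base "ENSFCAG" 7 (by decide) (by decide),
      pvCondIff base "ENSG" 4 (by decide) (by decide)]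
    split_ifs <;> rfl

theorem pvStep (result : PySem.Dict String String) (eid base : String) :
    (let pr := pvAInner result eid base
       (PySem.List.sorted pvPrefixToOrganism.keys (fun p => PySem.Str.len p) true)
     if pr.2 then pr.1 else pr.1.insert eid "unknown")
    = result.insert eid (pvBLoop base pvPrefixLengths) := by
  rw [show PySem.List.sorted pvPrefixToOrganism.keys (fun p => PySem.Str.len p) true =
    ["ENSMUSG","ENSRNOG","ENSDARG","ENSGALG","ENSBTAG","ENSSSCG","ENSCAFG","ENSECAG","ENSFCAG","ENSG"] from by decide]
  rw [show pvPrefixLengths = [7,4] from by decide]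
  rw [pvAInner_eq, pvVal_eq]

theorem pvFold_eq (ids : List String) :
    detect_organism_from_ensembl_ids ids = detect_organism_from_ensembl_ids_alt ids := by
  unfold detect_organism_from_ensembl_ids detect_organism_from_ensembl_ids_alt
  congr 1
  congr 1
  funext result eid
  exact pvStep result eid (pvBaseId eid)

-- ===== VERDICT (by name: the statement is the Claim_ definition above) =====
theorem detect_organism_from_ensembl_ids_spec : Claim_equal_detect_organism_from_ensembl_ids := by
  intro ids _
  unfold Spec_detect_organism_from_ensembl_ids
  exact pvFold_eq ids
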